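-- pv_equiv track=rewrite | github.com/EitanBakirov/malicious-file-classification-app | feature_extraction.py | extract_printable_strings
-- ===== SOURCE A (Python) =====
-- import string
--
-- def extract_printable_strings(file_bytes, min_len=5):
--     result = []
--     current = ''
--     for byte in file_bytes:
--         try:
--             char = chr(byte)
--             if char in string.printable and char not in '\n\r\t':
--                 current += char
--             else:
--                 if len(current) >= min_len:
--                     result.append(current)
--                 current = ''
--         except:
--             continue
--     if len(current) >= min_len:
--         result.append(current)
--     return result
-- ===== SOURCE B (Python) =====
-- def extract_printable_strings(file_bytes, min_len=5):
--     text = ''.join(chr(b) if b in (0x0b, 0x0c) or 0x20 <= b <= 0x7e else '\x00'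
--                    for b in file_bytes)
--     return [run for run in text.split('\x00') if len(run) >= min_len]
-- ===== Notes on version B (the rewrite author's own statement) =====
-- stated objective: simpler
-- what changed: Replaces A's per-byte run-building state machine (result/current accumulators with flush logic duplicated at separators and at the end) by a bulk pipeline: map each byte to its char or a NUL separator, join, split on the separator, filter runs by length; Pre_ restricts file_bytes to the natural byte domain 0-255, since on non-byte integers A's bare except silently skips chr-invalid values (merging adjacent runs), which B does not mirror.
-- outside the precondition, e.g. on extract_printable_strings([65, 65, -1, 65, 65, 65], 5): A returns ['AAAAA'], B returns []
import Mathlib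
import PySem

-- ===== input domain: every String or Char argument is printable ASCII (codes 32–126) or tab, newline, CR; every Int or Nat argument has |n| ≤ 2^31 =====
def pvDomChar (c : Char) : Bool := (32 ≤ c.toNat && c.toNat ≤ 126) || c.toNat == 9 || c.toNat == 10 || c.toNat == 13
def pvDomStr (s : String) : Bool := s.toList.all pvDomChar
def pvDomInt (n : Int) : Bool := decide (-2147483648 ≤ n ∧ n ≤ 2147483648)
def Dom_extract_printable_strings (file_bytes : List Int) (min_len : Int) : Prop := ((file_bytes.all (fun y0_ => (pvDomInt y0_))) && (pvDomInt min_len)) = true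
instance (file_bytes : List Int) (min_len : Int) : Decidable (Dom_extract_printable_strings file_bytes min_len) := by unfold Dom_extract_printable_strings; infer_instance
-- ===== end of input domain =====

-- B replaces A's per-byte run-building state machine by a bulk map/join/split/filter pipeline
-- (objective: simpler); equivalence proved on Pre_ (file_bytes in the byte domain 0–255).

-- ===== PORT A =====
-- A's for-loop over (result, current); `chr(byte)` raises exactly for byte < 0 or byte ≥ 0x110000,
-- and the bare `except: continue` skips such bytes; `char in string.printable and char not in '\n\r\t'`
-- holds exactly for codes 0x0b, 0x0c and 0x20–0x7e.
def extract_printable_strings (file_bytes : List Int) (min_len : Int) : List String :=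
  let p := file_bytes.foldl
    (fun (st : List String × List Char) byte =>
      if byte < 0 || 1114112 ≤ byte then st              -- chr raises; `except: continue`
      else if (32 ≤ byte && byte ≤ 126) || byte == 11 || byte == 12 then
        (st.1, st.2 ++ [Char.ofNat byte.toNat])          -- current += char
      else if min_len ≤ (st.2.length : Int) then (st.1 ++ [String.ofList st.2], [])
      else (st.1, []))
    ([], [])
  if min_len ≤ (p.2.length : Int) then p.1 ++ [String.ofList p.2] else p.1

-- ===== PORT B =====
-- Source B's per-byte expression: the byte's char if it codes a printable run character, else '\x00'.
def pvSym (b : Int) : Char :=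
  if b == 11 || b == 12 || (32 ≤ b && b ≤ 126) then Char.ofNat b.toNat else '\x00'

-- ''.join(... for b in file_bytes) is List.map pvSym; .split('\x00') is PySem.Chars.splitOn
-- (the non-empty-separator form of Python str.split); len(run) on String.ofList m is m.length.
def extract_printable_strings_alt (file_bytes : List Int) (min_len : Int) : List String :=
  let runs := PySem.Chars.splitOn (file_bytes.map pvSym) ['\x00']
  (runs.filter (fun m => min_len ≤ (m.length : Int))).map String.ofList

-- ===== PRECONDITION & SPEC =====
-- Pre_ restricts file_bytes to the natural byte domain 0–255, the values a bytes object can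
-- contain (the function's callers read files in binary mode); B does not mirror A's handling of
-- non-byte integers (its bare `except` skips values chr rejects, merging the adjacent runs).
def Pre_extract_printable_strings (file_bytes : List Int) (min_len : Int) : Prop :=
  ∀ b ∈ file_bytes, 0 ≤ b ∧ b ≤ 255
instance (file_bytes : List Int) (min_len : Int) : Decidable (Pre_extract_printable_strings file_bytes min_len) := by unfold Pre_extract_printable_strings; infer_instance

def pvWitness_extract_printable_strings : List Int × Int := ([72, 101, 108, 108, 111, 0, 33], 3)

def Spec_extract_printable_strings (file_bytes : List Int) (min_len : Int) (out : List String) : Prop := out = extract_printable_strings_alt file_bytes min_len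
instance (file_bytes : List Int) (min_len : Int) (out : List String) : Decidable (Spec_extract_printable_strings file_bytes min_len out) := by unfold Spec_extract_printable_strings; infer_instance

-- ===== CLAIM (what is proved, stated in full; the proofs are below) =====
def Claim_equal_extract_printable_strings : Prop := ∀ (file_bytes : List Int) (min_len : Int), Dom_extract_printable_strings file_bytes min_len → Pre_extract_printable_strings file_bytes min_len → Spec_extract_printable_strings file_bytes min_len (extract_printable_strings file_bytes min_len)

-- ===== LEMMAS AND PROOFS =====

-- A simple structural recursion equal to splitOn on a single-char separator: the proof vehicle.
def pvGsplit : List Char → List Char → List (List Char)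
  | [], cur => [cur.reverse]
  | x :: rest, cur => if x = '\x00' then cur.reverse :: pvGsplit rest [] else pvGsplit rest (x :: cur)

lemma pvGo_eq_gsplit : ∀ (fuel : Nat) (l cur : List Char) (acc : List (List Char)), l.length < fuel →
    PySem.Chars.splitOn.go ['\x00'] fuel l cur acc = acc.reverse ++ pvGsplit l cur := by
  intro fuel
  induction fuel with
  | zero => intro l cur acc h; omega
  | succ n ih =>
    intro l cur acc h
    cases l with
    | nil => simp [PySem.Chars.splitOn.go, pvGsplit]
    | cons c rest =>
      by_cases hc : c = '\x00'
      · subst hc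
        rw [PySem.Chars.splitOn.go.eq_def]
        simp only [List.isPrefixOf, List.length_cons, Bool.and_true, beq_self_eq_true, if_pos]
        simp only [List.length_nil, Nat.zero_add, List.drop_succ_cons, List.drop_zero]
        rw [ih rest [] (cur.reverse :: acc) (by simp at h ⊢; omega)]
        simp [pvGsplit]
      · rw [PySem.Chars.splitOn.go.eq_def]
        have : ['\x00'].isPrefixOf (c :: rest) = false := by
          simp [List.isPrefixOf]; exact fun h' => (hc h'.symm).elim
        simp only [this, Bool.false_eq_true, if_neg, not_false_iff]
        rw [ih rest (c :: cur) acc (by simp at h ⊢; omega)]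
        simp [pvGsplit, hc]

lemma pvSplitOn_eq_gsplit (l : List Char) :
    PySem.Chars.splitOn l ['\x00'] = pvGsplit l [] := by
  unfold PySem.Chars.splitOn
  rw [pvGo_eq_gsplit (l.length + 1) l [] [] (by omega)]
  simp

lemma pvCharOfNat_ne_nul {b : Int} (h1 : 0 < b) (h2 : b ≤ 126) :
    Char.ofNat b.toNat ≠ '\x00' := by
  intro h
  have hv : b.toNat.isValidChar := by
    left; omega
  have := congrArg Char.toNat h
  rw [Char.toNat_ofNat, if_pos hv] at this
  simp [Char.toNat] at this
  omega

-- the loop invariant: A's flush-as-you-go loop equals filter/map over pvGsplit of the mapped tail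
lemma pvMain (min_len : Int) : ∀ (bytes : List Int), (∀ b ∈ bytes, 0 ≤ b ∧ b ≤ 255) →
    ∀ (res : List String) (cur : List Char),
    (let p := bytes.foldl
        (fun (st : List String × List Char) byte =>
          if byte < 0 || 1114112 ≤ byte then st
          else if (32 ≤ byte && byte ≤ 126) || byte == 11 || byte == 12 then
            (st.1, st.2 ++ [Char.ofNat byte.toNat])
          else if min_len ≤ (st.2.length : Int) then (st.1 ++ [String.ofList st.2], [])
          else (st.1, []))
        (res, cur)
      if min_len ≤ (p.2.length : Int) then p.1 ++ [String.ofList p.2] else p.1)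
    = res ++ ((pvGsplit (bytes.map pvSym) cur.reverse).filter
        (fun m => min_len ≤ (m.length : Int))).map String.ofList := by
  intro bytes
  induction bytes with
  | nil =>
    intro _ res cur
    simp only [List.foldl_nil, List.map_nil, pvGsplit, List.reverse_reverse]
    by_cases h : min_len ≤ (cur.length : Int) <;> simp [h, List.filter]
  | cons b rest ih =>
    intro hpre res cur
    have hb := hpre b (List.mem_cons_self ..)
    have hrest := fun x hx => hpre x (List.mem_cons_of_mem _ hx)
    simp only [List.foldl_cons, List.map_cons]
    have hcond : (decide (b < 0) || decide (1114112 ≤ b)) = false := by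
      simp; omega
    simp only [hcond, Bool.false_eq_true, if_neg, not_false_iff]
    by_cases hall : (32 ≤ b ∧ b ≤ 126) ∨ b = 11 ∨ b = 12
    · have hc1 : ((decide (32 ≤ b) && decide (b ≤ 126)) || b == 11 || b == 12) = true := by
        simp; omega
      have hsym : pvSym b = Char.ofNat b.toNat := by
        unfold pvSym; rw [if_pos]; simp; omega
      simp only [hc1, if_pos, hsym]
      rw [ih hrest res (cur ++ [Char.ofNat b.toNat])]
      have hne : Char.ofNat b.toNat ≠ '\x00' := pvCharOfNat_ne_nul (by omega) (by omega)
      simp [pvGsplit, hne]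
    · have hc1 : ((decide (32 ≤ b) && decide (b ≤ 126)) || b == 11 || b == 12) = false := by
        simp; omega
      have hsym : pvSym b = '\x00' := by
        unfold pvSym; rw [if_neg]; simp; omega
      simp only [hc1, Bool.false_eq_true, if_neg, not_false_iff, hsym]
      by_cases hlen : min_len ≤ (cur.length : Int)
      · simp only [hlen, if_pos]
        rw [ih hrest (res ++ [String.ofList cur]) []]
        simp [pvGsplit, hlen]
      · simp only [hlen, if_neg, not_false_iff]
        rw [ih hrest res []]
        simp [pvGsplit, hlen]

-- ===== VERDICT (by name: the statement is the Claim_ definition above) =====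
theorem extract_printable_strings_spec : Claim_equal_extract_printable_strings := by
  intro file_bytes min_len _ hpre
  unfold Spec_extract_printable_strings extract_printable_strings extract_printable_strings_alt
  rw [pvSplitOn_eq_gsplit]
  have := pvMain min_len file_bytes hpre [] []
  simpa using this
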